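-- pv_equiv track=rewrite | github.com/shankarsravanth02/python | ANDsum.py | andSum
-- ===== SOURCE A (Python) =====
-- def andSum(arr, n):
--     a=0
--     for i in range(0, 32):
--         countSetBits = 0
--         for j in range(0, n) :
--             if (arr[j]&(1<<i)):
--                 countSetBits=countSetBits+1
--         subset=((1<<countSetBits)-1)
--         subset = (subset * (1 << i))
--         a = a + subset
--     return a
-- ===== SOURCE B (Python) =====
-- def andSum(arr, n):
--     total = 0
--     counts = {}
--     for j in range(n):
--         x = arr[j] & 0xFFFFFFFF
--         i = 0
--         while x:
--             if x & 1:
--                 c = counts.get(i, 0)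
--                 total += 1 << (c + i)
--                 counts[i] = c + 1
--             x >>= 1
--             i += 1
--     return total
-- ===== Notes on version B (the rewrite author's own statement) =====
-- stated objective: alternative
-- what changed: B drops A's 32 per-bit passes over the array and its (2^c-1)*2^i closed formula: it makes one pass over the elements, decomposes each element's masked 32-bit value into its set bits by shifting, and adds each bit's marginal contribution 2^(count+pos) to a running total, keeping per-position counts in a dict.
import Mathlib
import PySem

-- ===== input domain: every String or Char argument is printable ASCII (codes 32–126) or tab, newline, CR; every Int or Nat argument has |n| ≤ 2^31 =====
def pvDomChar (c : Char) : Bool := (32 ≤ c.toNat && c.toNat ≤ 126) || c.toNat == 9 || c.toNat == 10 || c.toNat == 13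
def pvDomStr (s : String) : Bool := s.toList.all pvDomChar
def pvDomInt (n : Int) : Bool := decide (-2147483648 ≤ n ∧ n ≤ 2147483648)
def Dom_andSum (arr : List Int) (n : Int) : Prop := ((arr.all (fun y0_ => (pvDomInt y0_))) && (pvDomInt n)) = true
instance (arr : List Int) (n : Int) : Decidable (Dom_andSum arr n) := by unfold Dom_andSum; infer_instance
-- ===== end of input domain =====

-- B replaces A's 32 per-bit scans of the array by a single pass over the elements, decomposing
-- each element into its set bits (mask, then shift/test) and adding each bit's marginal
-- contribution 2^(count+pos) to a running total, with a dict of per-position counts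
-- (objective: alternative algorithm, same asymptotic cost).

-- Python 'a << k': exact for k ≥ 0 (all shift amounts here are bit positions or nonnegative counts)
def pyShl (a : Int) (k : Int) : Int := a <<< k.toNat

-- ===== PORT A =====
def andSum (arr : List Int) (n : Int) : Int :=
  (PySem.List.pyRange 0 32 1).foldl (fun a i =>
    let countSetBits : Int :=
      (PySem.List.pyRange 0 n 1).foldl (fun c j =>
        if PySem.Int.band (PySem.List.pyGetD arr j 0) (pyShl 1 i) ≠ 0 then c + 1 else c) 0
    let subset : Int := (pyShl 1 countSetBits) - 1
    a + subset * (pyShl 1 i)) 0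

-- ===== PORT B =====
-- the 'while x:' loop of Source B; x is nonnegative at every call (it starts masked),
-- so the '0 < x' guard is Python's truth test and makes the recursion total
def pvInner (x : Int) (i : Int) (total : Int) (counts : PySem.Dict Int Int) :
    Int × PySem.Dict Int Int :=
  if h : 0 < x then
    if PySem.Int.band x 1 ≠ 0 then
      let c := counts.getD i 0
      pvInner (x >>> (1:Nat)) (i + 1) (total + pyShl 1 (c + i)) (counts.insert i (c + 1))
    else
      pvInner (x >>> (1:Nat)) (i + 1) total counts
  else (total, counts)
termination_by x.toNat
decreasing_by all_goals (rw [Int.shiftRight_eq_div_pow]; norm_num; omega)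

def andSum_alt (arr : List Int) (n : Int) : Int :=
  ((PySem.List.pyRange 0 n 1).foldl (fun st j =>
      pvInner (PySem.Int.band (PySem.List.pyGetD arr j 0) 4294967295) 0 st.1 st.2)
    ((0 : Int), (PySem.Dict.empty : PySem.Dict Int Int))).1

-- ===== PRECONDITION & SPEC =====
-- Python A raises IndexError when n > len(arr) (it reads arr[0..n-1]); those inputs are excluded.
def Pre_andSum (arr : List Int) (n : Int) : Prop := n ≤ (arr.length : Int)
instance (arr : List Int) (n : Int) : Decidable (Pre_andSum arr n) := by unfold Pre_andSum; infer_instance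
def pvWitness_andSum : List Int × Int := ([5, -3, 7], 3)

def Spec_andSum (arr : List Int) (n : Int) (out : Int) : Prop := out = andSum_alt arr n
instance (arr : List Int) (n : Int) (out : Int) : Decidable (Spec_andSum arr n out) := by unfold Spec_andSum; infer_instance

-- ===== CLAIM =====
def Claim_equal_andSum : Prop := ∀ (arr : List Int) (n : Int), Dom_andSum arr n → Pre_andSum arr n → Spec_andSum arr n (andSum arr n)

-- ===== LEMMAS AND PROOFS =====

theorem pvLdiff_add_and (m n : ℕ) : m.ldiff n + (m &&& n) = m := by
  induction m using Nat.binaryRec generalizing n with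
  | zero => simp [Nat.ldiff]
  | bit b m ih =>
    induction n using Nat.binaryRec with
    | zero => simp [Nat.ldiff]
    | bit c n _ =>
      rw [Nat.ldiff_bit, Nat.land_bit]
      have h := ih n
      rcases b <;> rcases c <;> simp [Nat.bit] <;> omega
theorem pvBand_eq_land (a b : Int) : PySem.Int.band a b = Int.land a b := by
  unfold PySem.Int.band Int.land
  rcases a with m | m <;> rcases b with n | n <;> simp [Int.negSucc_eq]
  · have := pvLdiff_add_and m n; omega
  · have := pvLdiff_add_and n m; omega
  · split_ifs <;> omega

theorem pvLand_two_pow (v : Int) (i : Nat) :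
    Int.land v ((2 ^ i : Nat) : Int) = (((v.testBit i).toNat : Nat) : Int) * ((2 ^ i : Nat) : Int) := by
  rcases v with m | m
  · show ((m &&& 2^i : Nat) : Int) = _
    rw [Nat.and_two_pow]
    simp [Int.testBit]
  · show (((2^i : Nat).ldiff m : Nat) : Int) = _
    have h : (2^i : Nat).ldiff m = (!m.testBit i).toNat * 2^i := by
      apply Nat.eq_of_testBit_eq
      intro k
      rw [Nat.testBit_ldiff]
      rcases hb : m.testBit i
      · simp [Nat.testBit_two_pow]
        intro hik; rw [← hik]; simp [hb]
      · simp [Nat.testBit_two_pow]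
        intro hik; rw [← hik]; simp [hb]
    rw [h]; simp [Int.testBit]

theorem pvOne_shl (i : Nat) : (1 : Int) <<< i = ((2 ^ i : Nat) : Int) := by
  rw [Int.shiftLeft_eq']; ring

theorem pvBand_two_pow_ne_iff (v : Int) (i : Nat) :
    (PySem.Int.band v ((1 : Int) <<< i) ≠ 0) ↔ v.testBit i = true := by
  rw [pvOne_shl, pvBand_eq_land, pvLand_two_pow]
  rcases h : v.testBit i <;> simp

theorem pvBand_mask_nonneg (v : Int) : 0 ≤ PySem.Int.band v 4294967295 := by
  rw [show (4294967295 : Int) = ((2^32 - 1 : Nat) : Int) by norm_num, pvBand_eq_land]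
  rcases v with m | m
  · show (0:Int) ≤ ((m &&& (2^32-1) : Nat) : Int); positivity
  · show (0:Int) ≤ (((2^32-1 : Nat).ldiff m : Nat) : Int); positivity

theorem pvBand_mask_lt (v : Int) : (PySem.Int.band v 4294967295).toNat < 2 ^ 32 := by
  rw [show (4294967295 : Int) = ((2^32 - 1 : Nat) : Int) by norm_num, pvBand_eq_land]
  rcases v with m | m
  · show ((((m &&& (2^32-1) : Nat)) : Int)).toNat < 2^32
    have h := Nat.and_two_pow_sub_one_eq_mod m 32
    have h2 : m % 2^32 < 2^32 := Nat.mod_lt _ (by norm_num)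
    simp only [Int.toNat_natCast, h]
    exact h2
  · show (((((2^32-1 : Nat)).ldiff m : Nat) : Int)).toNat < 2^32
    have h := pvLdiff_add_and (2^32-1) m
    simp only [Int.toNat_natCast]
    omega

theorem pvTestBit_band_mask (v : Int) (i : Nat) (hi : i < 32) :
    (PySem.Int.band v 4294967295).toNat.testBit i = v.testBit i := by
  have hnn : 0 ≤ PySem.Int.band v 4294967295 := pvBand_mask_nonneg v
  have h1 : ((PySem.Int.band v 4294967295).toNat : Int).testBit i = (PySem.Int.band v 4294967295).testBit i := by
    rw [Int.toNat_of_nonneg hnn]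
  have h2 : ((PySem.Int.band v 4294967295).toNat : Int).testBit i = (PySem.Int.band v 4294967295).toNat.testBit i := rfl
  rw [← h2, h1, pvBand_eq_land,
    show (4294967295 : Int) = ((2^32 - 1 : Nat) : Int) by norm_num, Int.testBit_land]
  have : (((2^32 - 1 : Nat) : Int)).testBit i = (2^32 - 1 : Nat).testBit i := rfl
  rw [this, Nat.testBit_two_pow_sub_one]
  simp [hi]

theorem pvShiftNat (m : Nat) : ((m : Int) >>> (1:Nat)) = ((m / 2 : Nat) : Int) := by
  rw [show ((m:Int) >>> (1:Nat)) = ((m >>> 1 : Nat) : Int) from rfl, Nat.shiftRight_one]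

theorem pvShl_nonneg (c : Int) (s : Nat) (hc : 0 ≤ c) :
    pyShl 1 (c + (s : Int)) = (2:Int) ^ (c.toNat + s) := by
  unfold pyShl
  rw [Int.shiftLeft_eq']
  have : (c + (s:Int)).toNat = c.toNat + s := by omega
  rw [this]
  push_cast
  ring

theorem pvInner_spec (m : Nat) :
    ∀ (s : Nat), m < 2 ^ (32 - s) → s ≤ 32 →
    ∀ (total : Int) (d : PySem.Dict Int Int),
    (∀ k : Nat, k < 32 → 0 ≤ d.getD (k : Int) 0) →
    (pvInner (m : Int) (s : Int) total d).1
      = total + ∑ b ∈ Finset.range (32 - s),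
          (if m.testBit b then (2 : Int) ^ ((d.getD ((s + b : Nat) : Int) 0).toNat + s + b) else 0)
    ∧ ∀ k : Nat, k < 32 →
        (pvInner (m : Int) (s : Int) total d).2.getD (k : Int) 0
          = d.getD (k : Int) 0 + (if s ≤ k ∧ m.testBit (k - s) then 1 else 0) := by
  induction m using Nat.strong_induction_on with
  | _ m ih =>
  intro s hm hs total d hnn
  rcases Nat.eq_zero_or_pos m with h0 | hpos
  · subst h0
    rw [pvInner]
    simp only [Nat.cast_zero, lt_irrefl, dite_false]
    constructor
    · simp [Nat.testBit]
    · intro k hk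
      simp [Nat.testBit]
  · -- m > 0
    have hslt : s < 32 := by
      by_contra hc
      have : 32 - s = 0 := by omega
      rw [this] at hm; simp at hm; omega
    have hrec : m / 2 < 2 ^ (32 - (s + 1)) := by
      have h1 : 32 - s = (32 - (s+1)) + 1 := by omega
      rw [h1, pow_succ] at hm
      omega
    have hlt : m / 2 < m := Nat.div_lt_self hpos (by norm_num)
    have hx : (0:Int) < (m : Int) := by exact_mod_cast hpos
    rw [pvInner]
    simp only [hx, dite_true]
    have hband : PySem.Int.band (m : Int) 1 = ((m % 2 : Nat) : Int) := by
      rw [show (1:Int) = ((1:Nat):Int) from rfl, PySem.Int.band_natCast, Nat.and_one_is_mod]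
    rcases Nat.mod_two_eq_zero_or_one m with he | ho
    · -- even: bit 0 clear
      have hcond : ¬ (PySem.Int.band (m : Int) 1 ≠ 0) := by
        rw [hband, he]; simp
      simp only [hcond, if_false]
      rw [pvShiftNat]
      have hcast : ((s:Int) + 1) = ((s+1 : Nat) : Int) := by push_cast; ring
      rw [hcast]
      obtain ⟨ht, hd⟩ := ih (m/2) hlt (s+1) hrec (by omega) total d hnn
      constructor
      · rw [ht]
        congr 1
        have hsplit : 32 - s = (32 - (s+1)) + 1 := by omega
        rw [hsplit, Finset.sum_range_succ']
        have hb0 : m.testBit 0 = false := by simp [Nat.testBit_zero, he]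
        rw [hb0]
        simp only [Bool.false_eq_true, if_false, add_zero]
        apply Finset.sum_congr rfl
        intro b _
        have h1 : m.testBit (b+1) = (m/2).testBit b := Nat.testBit_succ m b
        have h2 : s + (b + 1) = (s + 1) + b := by omega
        have h3 : (d.getD ((s + (b+1) : Nat) : Int) 0).toNat + s + (b+1)
            = (d.getD (((s+1) + b : Nat) : Int) 0).toNat + (s+1) + b := by
          rw [h2]; omega
        rw [h1, h2]
        congr 2
        omega
      · intro k hk
        rw [hd k hk]
        congr 1
        by_cases hks : s ≤ k
        · rcases Nat.eq_or_lt_of_le hks with heq | hlt2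
          · subst heq
            have : ¬ (s + 1 ≤ s) := by omega
            simp only [this, false_and, if_false]
            have hb0 : m.testBit 0 = false := by simp [Nat.testBit_zero, he]
            rw [Nat.sub_self]
            simp [hb0]
          · have h1 : k - (s+1) + 1 = k - s := by omega
            have h2 : m.testBit (k - s) = (m/2).testBit (k - (s+1)) := by
              rw [← h1]
              exact Nat.testBit_succ m (k - (s+1))
            rw [h2]
            congr 1
            simp only [eq_iff_iff]
            constructor
            · rintro ⟨a, b⟩; exact ⟨by omega, b⟩
            · rintro ⟨a, b⟩; exact ⟨by omega, b⟩
        · have h1 : ¬ (s + 1 ≤ k) := by omega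
          simp [hks, h1]
    · -- odd: bit 0 set
      have hcond : PySem.Int.band (m : Int) 1 ≠ 0 := by
        rw [hband, ho]; simp
      rw [if_pos hcond]
      rw [pvShiftNat]
      have hcast : ((s:Int) + 1) = ((s+1 : Nat) : Int) := by push_cast; ring
      rw [hcast]
      have hc : 0 ≤ d.getD ((s:Nat) : Int) 0 := hnn s hslt
      have hnn' : ∀ k : Nat, k < 32 → 0 ≤ (d.insert ((s:Nat):Int) (d.getD ((s:Nat):Int) 0 + 1)).getD ((k:Nat):Int) 0 := by
        intro k hk
        rw [PySem.Dict.getD_insert]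
        by_cases hks : ((k:Nat):Int) = ((s:Nat):Int)
        · rw [if_pos hks]; omega
        · rw [if_neg hks]; exact hnn k hk
      obtain ⟨ht, hd⟩ := ih (m/2) hlt (s+1) hrec (by omega)
        (total + pyShl 1 (d.getD ((s:Nat):Int) 0 + (s:Int)))
        (d.insert ((s:Nat):Int) (d.getD ((s:Nat):Int) 0 + 1)) hnn'
      constructor
      · rw [ht]
        have hsplit : 32 - s = (32 - (s+1)) + 1 := by omega
        rw [hsplit, Finset.sum_range_succ']
        have hb0 : m.testBit 0 = true := by simp [Nat.testBit_zero, ho]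
        rw [hb0]
        simp only [if_true, Nat.add_zero]
        rw [pvShl_nonneg _ _ hc]
        have hsum : ∀ b ∈ Finset.range (32 - (s+1)),
            (if (m/2).testBit b = true then (2:Int) ^ (((d.insert ((s:Nat):Int) (d.getD ((s:Nat):Int) 0 + 1)).getD (((s+1+b : Nat)):Int) 0).toNat + (s+1) + b) else 0)
          = (if m.testBit (b+1) = true then (2:Int) ^ ((d.getD (((s+(b+1) : Nat)):Int) 0).toNat + s + (b+1)) else 0) := by
          intro b _
          have hne : ((s+1+b : Nat) : Int) ≠ ((s : Nat) : Int) := by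
            push_cast; omega
          rw [PySem.Dict.getD_insert, if_neg hne]
          have h1 : m.testBit (b+1) = (m/2).testBit b := Nat.testBit_succ m b
          have h2 : s + (b+1) = s+1+b := by omega
          rw [h1, h2]
          congr 2
          omega
        rw [Finset.sum_congr rfl hsum]
        ring
      · intro k hk
        rw [hd k hk, PySem.Dict.getD_insert]
        by_cases hks : ((k:Nat):Int) = ((s:Nat):Int)
        · rw [if_pos hks]
          have hks' : k = s := by exact_mod_cast hks
          subst hks'
          have hb0 : m.testBit 0 = true := by simp [Nat.testBit_zero, ho]
          have h1 : ¬ (k + 1 ≤ k) := by omega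
          simp only [h1, false_and, if_false, add_zero, Nat.sub_self]
          simp [hb0]
        · rw [if_neg hks]
          have hks' : k ≠ s := by
            intro h; exact hks (by exact_mod_cast h)
          congr 1
          by_cases hlt2 : s < k
          · have h1 : k - (s+1) + 1 = k - s := by omega
            have h2 : m.testBit (k - s) = (m/2).testBit (k - (s+1)) := by
              rw [← h1]
              exact Nat.testBit_succ m (k - (s+1))
            rw [h2]
            congr 1
            simp only [eq_iff_iff]
            constructor
            · rintro ⟨a, b⟩; exact ⟨by omega, b⟩
            · rintro ⟨a, b⟩; exact ⟨by omega, b⟩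
          · have h1 : ¬ (s + 1 ≤ k) := by omega
            have h2 : ¬ (s ≤ k) := by omega
            simp [h1, h2]

-- number of elements of ws with bit i set
def pvCnt32 (ws : List Int) (i : Nat) : Nat := ws.countP (fun v => v.testBit i)

-- the closed value both programs compute per bit position
def pvF (f : Nat -> Nat) : Int := ∑ i ∈ Finset.range 32, ((2 : Int) ^ f i - 1) * 2 ^ i

theorem pvA_char (arr : List Int) (n : Int) :
    andSum arr n = pvF (pvCnt32 ((PySem.List.pyRange 0 n 1).map (fun j => PySem.List.pyGetD arr j 0))) := by
  set ws := (PySem.List.pyRange 0 n 1).map (fun j => PySem.List.pyGetD arr j 0) with hws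
  have hstep := PySem.List.foldl_add (PySem.List.pyRange 0 32 1)
    (fun i => ((pyShl 1 ((PySem.List.pyRange 0 n 1).foldl (fun c j =>
        if PySem.Int.band (PySem.List.pyGetD arr j 0) (pyShl 1 i) ≠ 0 then c + 1 else c) 0)) - 1)
      * pyShl 1 i) 0
  have h1 : andSum arr n = ((PySem.List.pyRange 0 32 1).map
      (fun i => ((pyShl 1 ((PySem.List.pyRange 0 n 1).foldl (fun c j =>
        if PySem.Int.band (PySem.List.pyGetD arr j 0) (pyShl 1 i) ≠ 0 then c + 1 else c) 0)) - 1)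
      * pyShl 1 i)).sum := by
    unfold andSum
    rw [hstep]  -- ? shape match
    ring
  rw [h1, PySem.List.pyRange_one 0 32]
  simp only [zero_add]
  rw [List.map_map]
  have hfun : ((fun i => ((pyShl 1 ((PySem.List.pyRange 0 n 1).foldl (fun c j =>
        if PySem.Int.band (PySem.List.pyGetD arr j 0) (pyShl 1 i) ≠ 0 then c + 1 else c) 0)) - 1)
      * pyShl 1 i) ∘ (fun k : Nat => ((k : Int))))
      = fun k : Nat => ((2:Int) ^ (pvCnt32 ws k) - 1) * 2 ^ k := by
    funext k
    simp only [Function.comp, pyShl, Int.toNat_natCast, pvBand_two_pow_ne_iff]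
    rw [PySem.List.foldl_count_if (fun j => (PySem.List.pyGetD arr j 0).testBit k)
      (PySem.List.pyRange 0 n 1) 0]
    simp only [zero_add, pvCnt32, hws, List.countP_map]
    rw [Int.shiftLeft_eq', Int.shiftLeft_eq', Int.toNat_natCast]
    push_cast
    rw [show List.countP ((fun v => v.testBit k) ∘ fun j => PySem.List.pyGetD arr j 0)
        (PySem.List.pyRange 0 n 1)
      = List.countP (fun j => (PySem.List.pyGetD arr j 0).testBit k) (PySem.List.pyRange 0 n 1) from rfl]
    ring
  have hcast : (((32:Int) - 0).toNat) = 32 := rfl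
  rw [hcast, hfun]
  rfl

theorem pvCnt32_append (p : List Int) (v : Int) (k : Nat) :
    pvCnt32 (p ++ [v]) k = pvCnt32 p k + (if v.testBit k then 1 else 0) := by
  unfold pvCnt32
  rw [List.countP_append]
  simp [List.countP_cons]

theorem pvF_append (p : List Int) (v : Int) :
    pvF (pvCnt32 (p ++ [v])) - pvF (pvCnt32 p)
      = ∑ b ∈ Finset.range 32, (if v.testBit b then (2:Int) ^ (pvCnt32 p b + b) else 0) := by
  unfold pvF
  rw [← Finset.sum_sub_distrib]
  apply Finset.sum_congr rfl
  intro b _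
  rw [pvCnt32_append]
  by_cases hb : v.testBit b
  · simp only [hb, if_pos]
    rw [pow_succ, pow_add (2:Int) (pvCnt32 p b) b]
    ring
  · simp [hb]

theorem pvOuter_spec (ws : List Int) :
    ∀ (p : List Int) (total : Int) (d : PySem.Dict Int Int),
    (∀ k : Nat, k < 32 → d.getD (k : Int) 0 = (pvCnt32 p k : Int)) →
    (ws.foldl (fun st v => pvInner (PySem.Int.band v 4294967295) 0 st.1 st.2) (total, d)).1
      = total + (pvF (pvCnt32 (p ++ ws)) - pvF (pvCnt32 p)) := by
  induction ws with
  | nil =>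
    intro p total d hd
    simp
  | cons v rest ihw =>
    intro p total d hd
    simp only [List.foldl_cons]
    have hnn : ∀ k : Nat, k < 32 → 0 ≤ d.getD (k : Int) 0 := by
      intro k hk; rw [hd k hk]; positivity
    have hm0 : PySem.Int.band v 4294967295 = (((PySem.Int.band v 4294967295).toNat : Nat) : Int) :=
      (Int.toNat_of_nonneg (pvBand_mask_nonneg v)).symm
    obtain ⟨ht, hdd⟩ := pvInner_spec (PySem.Int.band v 4294967295).toNat 0
      (by simpa using pvBand_mask_lt v) (by norm_num) total d hnn
    have hz : (((0:Nat)) : Int) = (0 : Int) := by norm_num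
    rw [hz] at ht hdd
    have hpair : pvInner (PySem.Int.band v 4294967295) 0 total d
        = ((pvInner (((PySem.Int.band v 4294967295).toNat : Nat) : Int) 0 total d).1,
           (pvInner (((PySem.Int.band v 4294967295).toNat : Nat) : Int) 0 total d).2) := by
      rw [← hm0]
    rw [hpair, ihw (p ++ [v]) _ _ ?hd2]
    case hd2 =>
      intro k hk
      rw [hdd k hk, hd k hk, pvCnt32_append]
      have hb : (PySem.Int.band v 4294967295).toNat.testBit (k - 0) = v.testBit k := by
        rw [Nat.sub_zero]; exact pvTestBit_band_mask v k hk
      rw [hb]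
      have : (0 ≤ k ∧ v.testBit k = true) ↔ (v.testBit k = true) := by
        constructor
        · exact fun h => h.2
        · exact fun h => ⟨Nat.zero_le k, h⟩
      push_cast
      by_cases hvb : v.testBit k <;> simp [hvb]
    rw [ht]
    have hT : ∑ b ∈ Finset.range (32 - 0),
        (if (PySem.Int.band v 4294967295).toNat.testBit b
          then (2:Int) ^ ((d.getD ((0 + b : Nat) : Int) 0).toNat + 0 + b) else 0)
      = ∑ b ∈ Finset.range 32, (if v.testBit b then (2:Int) ^ (pvCnt32 p b + b) else 0) := by
      rw [Nat.sub_zero]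
      apply Finset.sum_congr rfl
      intro b hb
      have hb32 : b < 32 := Finset.mem_range.mp hb
      rw [pvTestBit_band_mask v b hb32]
      have h1 : ((0 + b : Nat) : Int) = ((b : Nat) : Int) := by norm_num
      rw [h1, hd b hb32]
      simp
    rw [hT, ← pvF_append]
    have hassoc : (p ++ [v]) ++ rest = p ++ (v :: rest) := by simp
    rw [hassoc]
    ring

theorem pvF_zero : pvF (pvCnt32 []) = 0 := by
  unfold pvF
  apply Finset.sum_eq_zero
  intro i _
  simp [pvCnt32]

theorem pvB_char (arr : List Int) (n : Int) :
    andSum_alt arr n = pvF (pvCnt32 ((PySem.List.pyRange 0 n 1).map (fun j => PySem.List.pyGetD arr j 0))) := by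
  unfold andSum_alt
  rw [show ((PySem.List.pyRange 0 n 1).foldl (fun st j =>
      pvInner (PySem.Int.band (PySem.List.pyGetD arr j 0) 4294967295) 0 st.1 st.2)
      ((0 : Int), (PySem.Dict.empty : PySem.Dict Int Int)))
    = (((PySem.List.pyRange 0 n 1).map (fun j => PySem.List.pyGetD arr j 0)).foldl
        (fun st v => pvInner (PySem.Int.band v 4294967295) 0 st.1 st.2)
        ((0 : Int), (PySem.Dict.empty : PySem.Dict Int Int))) from (List.foldl_map
        (f := fun j => PySem.List.pyGetD arr j 0)
        (g := fun st v => pvInner (PySem.Int.band v 4294967295) 0 st.1 st.2)).symm]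
  rw [pvOuter_spec _ [] 0 PySem.Dict.empty (by
    intro k hk
    simp [pvCnt32])]
  rw [List.nil_append, pvF_zero]
  ring

-- ===== VERDICT =====
theorem andSum_spec : Claim_equal_andSum := by
  intro arr n _ _
  unfold Spec_andSum
  rw [pvA_char, pvB_char]
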